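-- pv_equiv track=rewrite | github.com/vedant-kokate/Project-Euler | 820.py | get_chain
-- ===== SOURCE A (Python) =====
-- import itertools
--
-- def get_chain(n):
--     mem = {}
--     cur = 10
--     chain = []
--     for i in itertools.count(0):
--         if cur in mem:
--             break
--         mem[cur] = i
--         chain.append(cur // n)
--         cur %= n
--         cur *= 10
--     return chain[:mem[cur]], chain[mem[cur]:]
-- ===== SOURCE B (Python) =====
-- def get_chain(n):
--     # Floyd pointer-based cycle detection on f(c) = (c % n) * 10 starting at 10,
--     # then regenerate the digits once: no per-state dictionary is kept.
--     def f(c):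
--         return (c % n) * 10
--
--     # Phase 1: find a meeting point inside the cycle.
--     tort = f(10)
--     hare = f(f(10))
--     while tort != hare:
--         tort = f(tort)
--         hare = f(f(hare))
--     # Phase 2: find mu, the start index of the cycle.
--     mu = 0
--     tort = 10
--     while tort != hare:
--         tort = f(tort)
--         hare = f(hare)
--         mu += 1
--     # Phase 3: find lam, the cycle length.
--     lam = 1
--     hare = f(tort)
--     while tort != hare:
--         hare = f(hare)
--         lam += 1
--     # Regenerate the digits: mu non-repeating, then lam repeating.
--     pre = []
--     cur = 10
--     for _ in range(mu):
--         pre.append(cur // n)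
--         cur = f(cur)
--     rep = []
--     for _ in range(lam):
--         rep.append(cur // n)
--         cur = f(cur)
--     return pre, rep
-- ===== Notes on version B (the rewrite author's own statement) =====
-- stated objective: alternative
-- what changed: Replaces the hash-map first-occurrence table with Floyd's pointer-based cycle detection (find meeting point, then cycle start mu and cycle length lam) and regenerates the mu+lam digits in one extra pass, keeping O(1) state instead of a per-state dictionary.
import Mathlib
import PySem

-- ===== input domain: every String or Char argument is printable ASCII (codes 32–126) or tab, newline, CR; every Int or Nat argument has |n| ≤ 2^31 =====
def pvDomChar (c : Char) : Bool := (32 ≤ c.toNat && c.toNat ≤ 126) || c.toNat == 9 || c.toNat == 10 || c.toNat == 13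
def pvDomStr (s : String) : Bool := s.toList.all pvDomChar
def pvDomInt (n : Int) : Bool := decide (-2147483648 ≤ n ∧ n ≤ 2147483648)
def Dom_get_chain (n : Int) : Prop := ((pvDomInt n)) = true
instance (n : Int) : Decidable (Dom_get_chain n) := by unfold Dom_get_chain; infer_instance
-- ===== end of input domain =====

-- B replaces A's hash-map first-occurrence table by Floyd's pointer-based cycle detection plus one
-- regeneration pass (alternative decomposition: O(1) extra state instead of a per-state dictionary).

-- ===== PORT A =====
-- A's loop ('for i in itertools.count(0): if cur in mem: break; …') as fuel recursion; the fuel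
-- 2*|n|+3 only makes it total and is proved sufficient below (it never runs out when n ≠ 0).
def gcALoop (n : Int) : Nat → PySem.Dict Int Int → Int → List Int → Int → List Int × List Int
  | 0, _mem, _cur, _chain, _i => ([], [])
  | fuel+1, mem, cur, chain, i =>
    match mem.get? cur with
    | some j => (PySem.List.slice chain none (some j), PySem.List.slice chain (some j) none)
    | none =>
        gcALoop n fuel (mem.insert cur i) (PySem.Int.mod cur n * 10)
          (chain ++ [PySem.Int.floordiv cur n]) (i + 1)

def get_chain (n : Int) : List Int × List Int :=
  gcALoop n (2 * n.natAbs + 3) PySem.Dict.empty 10 [] 0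

-- ===== PORT B =====
-- f(c) = (c % n) * 10
def gcStep (n c : Int) : Int := PySem.Int.mod c n * 10

-- phase 1: 'while tort != hare: tort = f(tort); hare = f(f(hare))' (fuel = totality guard)
def gcFloyd1 (n : Int) : Nat → Int → Int → Int
  | 0, _tort, hare => hare
  | fuel+1, tort, hare =>
    if tort = hare then hare
    else gcFloyd1 n fuel (gcStep n tort) (gcStep n (gcStep n hare))

-- phase 2: 'while tort != hare: tort = f(tort); hare = f(hare); mu += 1'
def gcFloyd2 (n : Int) : Nat → Nat → Int → Int → Nat × Int
  | 0, mu, tort, _hare => (mu, tort)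
  | fuel+1, mu, tort, hare =>
    if tort = hare then (mu, tort)
    else gcFloyd2 n fuel (mu + 1) (gcStep n tort) (gcStep n hare)

-- phase 3: 'while tort != hare: hare = f(hare); lam += 1'
def gcFloyd3 (n : Int) : Nat → Nat → Int → Int → Nat
  | 0, lam, _tort, _hare => lam
  | fuel+1, lam, tort, hare =>
    if tort = hare then lam
    else gcFloyd3 n fuel (lam + 1) tort (gcStep n hare)

-- 'for _ in range(k): out.append(cur // n); cur = f(cur)'
def gcGen (n : Int) : Nat → List Int → Int → List Int × Int
  | 0, acc, cur => (acc, cur)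
  | k+1, acc, cur => gcGen n k (acc ++ [PySem.Int.floordiv cur n]) (gcStep n cur)

def get_chain_alt (n : Int) : List Int × List Int :=
  let fuel := 2 * n.natAbs + 3
  let hare := gcFloyd1 n fuel (gcStep n 10) (gcStep n (gcStep n 10))
  let p := gcFloyd2 n fuel 0 10 hare
  let lam := gcFloyd3 n fuel 1 p.2 (gcStep n p.2)
  let q := gcGen n p.1 [] 10
  let r := gcGen n lam [] q.2
  (q.1, r.1)

-- ===== PRECONDITION & SPEC =====
-- A raises ZeroDivisionError exactly at n = 0; on every other int it returns.
def Pre_get_chain (n : Int) : Prop := n ≠ 0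
instance (n : Int) : Decidable (Pre_get_chain n) := by unfold Pre_get_chain; infer_instance

def pvWitness_get_chain : Int := (7)

def Spec_get_chain (n : Int) (out : List Int × List Int) : Prop := out = get_chain_alt n
instance (n : Int) (out : List Int × List Int) : Decidable (Spec_get_chain n out) := by unfold Spec_get_chain; infer_instance

-- ===== CLAIM (what is proved, stated in full; the proofs are below) =====
def Claim_equal_get_chain : Prop := ∀ (n : Int), Dom_get_chain n → Pre_get_chain n → Spec_get_chain n (get_chain n)

-- ===== LEMMAS AND PROOFS =====

-- the orbit of the long-division state: g 0 = 10, g (i+1) = f (g i)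
def gcG (n : Int) : Nat → Int
  | 0 => 10
  | i+1 => gcStep n (gcG n i)

def gcDig (n : Int) (c : Int) : Int := PySem.Int.floordiv c n

lemma gcG_mem (n : Int) (hn : n ≠ 0) (i : Nat) :
    gcG n (i+1) ∈ (Finset.Ioo (-(n.natAbs : Int)) (n.natAbs : Int)).image (· * 10) := by
  simp only [gcG, gcStep, Finset.mem_image, Finset.mem_Ioo]
  refine ⟨PySem.Int.mod (gcG n i) n, ⟨?_, ?_⟩, rfl⟩
  · rcases lt_or_gt_of_ne hn with h | h
    · have := (PySem.Int.mod_neg_bounds (a := gcG n i) h).1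
      omega
    · have := PySem.Int.mod_nonneg (a := gcG n i) h
      omega
  · rcases lt_or_gt_of_ne hn with h | h
    · have := (PySem.Int.mod_neg_bounds (a := gcG n i) h).2
      omega
    · have := PySem.Int.mod_lt (a := gcG n i) h
      omega

lemma gc_exists_rep (n : Int) (hn : n ≠ 0) :
    ∃ t, ∃ j, j < t ∧ gcG n j = gcG n t := by
  classical
  set S := (Finset.Ioo (-(n.natAbs : Int)) (n.natAbs : Int)).image (· * 10) with hS
  have hcard : S.card ≤ 2 * n.natAbs - 1 := by
    calc S.card ≤ (Finset.Ioo (-(n.natAbs : Int)) (n.natAbs : Int)).card := Finset.card_image_le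
    _ = 2 * n.natAbs - 1 := by rw [Int.card_Ioo]; omega
  have hN : 1 ≤ n.natAbs := by omega
  have hmaps : ∀ a ∈ Finset.range (2 * n.natAbs), gcG n (a+1) ∈ S := fun a _ => gcG_mem n hn a
  obtain ⟨a, ha, b, hb, hab, heq⟩ :=
    Finset.exists_ne_map_eq_of_card_lt_of_maps_to (by simp; omega) hmaps
  rcases Nat.lt_or_ge a b with h | h
  · exact ⟨b+1, a+1, by omega, heq⟩
  · exact ⟨a+1, b+1, by omega, heq.symm⟩

lemma gc_bundle (n : Int) (hn : n ≠ 0) :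
    ∃ mu lam : Nat, 1 ≤ lam ∧ mu + lam ≤ 2 * n.natAbs ∧
      gcG n (mu + lam) = gcG n mu ∧
      (∀ i j, i < j → j < mu + lam → gcG n i ≠ gcG n j) := by
  classical
  obtain hex := gc_exists_rep n hn
  set T := Nat.find hex with hTdef
  obtain ⟨j0, hj0, hj0eq⟩ := Nat.find_spec hex
  have hinj : ∀ i j, i < j → j < T → gcG n i ≠ gcG n j := by
    intro i j hij hjT heq
    exact absurd ⟨i, hij, heq⟩ (Nat.find_min hex hjT)
  have hsum : j0 + (T - j0) = T := by omega
  have hTb : T ≤ 2 * n.natAbs := by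
    by_contra hc
    set S := (Finset.Ioo (-(n.natAbs : Int)) (n.natAbs : Int)).image (· * 10) with hS
    have hcard : S.card ≤ 2 * n.natAbs - 1 := by
      calc S.card ≤ (Finset.Ioo (-(n.natAbs : Int)) (n.natAbs : Int)).card := Finset.card_image_le
      _ = 2 * n.natAbs - 1 := by rw [Int.card_Ioo]; omega
    have hle := Finset.card_le_card_of_injOn (f := fun i => gcG n (i+1))
      (s := Finset.range (T - 1)) (t := S)
      (fun a _ => gcG_mem n hn a)
      (by
        intro a ha b hb heq
        simp only [Finset.coe_range, Set.mem_Iio] at ha hb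
        by_contra hne
        rcases Nat.lt_or_ge a b with h | h
        · exact hinj (a+1) (b+1) (by omega) (by omega) heq
        · exact hinj (b+1) (a+1) (by omega) (by omega) heq.symm)
    simp only [Finset.card_range] at hle
    have hN : 1 ≤ n.natAbs := by omega
    omega
  exact ⟨j0, T - j0, by omega, by omega,
    by rw [hsum]; exact hj0eq.symm,
    by rw [hsum]; exact hinj⟩

lemma gc_per (n : Int) (mu lam : Nat) (hrep : gcG n (mu + lam) = gcG n mu) :
    ∀ i, mu ≤ i → gcG n (i + lam) = gcG n i := by
  intro i hi
  induction i, hi using Nat.le_induction with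
  | base => exact hrep
  | succ i hi ih =>
      have h1 : i + 1 + lam = (i + lam) + 1 := by omega
      rw [h1]
      show gcStep n (gcG n (i + lam)) = gcStep n (gcG n i)
      rw [ih]

lemma gc_per_mul (n : Int) (mu lam : Nat) (hrep : gcG n (mu + lam) = gcG n mu) :
    ∀ k i, mu ≤ i → gcG n (i + k * lam) = gcG n i := by
  intro k
  induction k with
  | zero => simp
  | succ k ih =>
      intro i hi
      have h1 : i + (k+1) * lam = (i + k * lam) + lam := by ring
      rw [h1, gc_per n mu lam hrep _ (by omega), ih i hi]

lemma gc_canon (n : Int) (mu lam : Nat) (hlam : 1 ≤ lam)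
    (hrep : gcG n (mu + lam) = gcG n mu) (i : Nat) (hi : mu ≤ i) :
    gcG n i = gcG n (mu + (i - mu) % lam) := by
  have hdm := Nat.mod_add_div' (i - mu) lam
  have h1 : i = (mu + (i - mu) % lam) + ((i - mu) / lam) * lam := by omega
  conv_lhs => rw [h1]
  exact gc_per_mul n mu lam hrep _ _ (by omega)

lemma gc_eq_mod (n : Int) (mu lam : Nat) (hlam : 1 ≤ lam)
    (hrep : gcG n (mu + lam) = gcG n mu)
    (hinj : ∀ i j, i < j → j < mu + lam → gcG n i ≠ gcG n j)
    (i j : Nat) (hi : mu ≤ i) (hj : mu ≤ j) :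
    gcG n i = gcG n j ↔ (i - mu) % lam = (j - mu) % lam := by
  constructor
  · intro heq
    have hri : (i - mu) % lam < lam := Nat.mod_lt _ (by omega)
    have hrj : (j - mu) % lam < lam := Nat.mod_lt _ (by omega)
    by_contra hne
    have h1 := (gc_canon n mu lam hlam hrep i hi).symm.trans (heq.trans (gc_canon n mu lam hlam hrep j hj))
    rcases Nat.lt_or_ge ((i - mu) % lam) ((j - mu) % lam) with h | h
    · exact hinj _ _ (by omega) (by omega) h1
    · exact hinj _ _ (by omega) (by omega) h1.symm
  · intro hmod
    rw [gc_canon n mu lam hlam hrep i hi, gc_canon n mu lam hlam hrep j hj, hmod]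

lemma gc_tail_ne (n : Int) (mu lam : Nat) (hlam : 1 ≤ lam)
    (hrep : gcG n (mu + lam) = gcG n mu)
    (hinj : ∀ i j, i < j → j < mu + lam → gcG n i ≠ gcG n j)
    (i j : Nat) (hi : i < mu) (hj : mu ≤ j) : gcG n i ≠ gcG n j := by
  intro heq
  have hrj : (j - mu) % lam < lam := Nat.mod_lt _ (by omega)
  have h1 := heq.trans (gc_canon n mu lam hlam hrep j hj)
  exact hinj i (mu + (j - mu) % lam) (by omega) (by omega) h1

lemma gc_meet_iff (n : Int) (mu lam : Nat) (hlam : 1 ≤ lam)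
    (hrep : gcG n (mu + lam) = gcG n mu)
    (hinj : ∀ i j, i < j → j < mu + lam → gcG n i ≠ gcG n j)
    (m : Nat) (hm : 1 ≤ m) :
    gcG n m = gcG n (2 * m) ↔ (mu ≤ m ∧ lam ∣ m) := by
  rcases Nat.lt_or_ge m mu with hlt | hge
  · constructor
    · intro heq
      exfalso
      rcases Nat.lt_or_ge (2 * m) mu with h2 | h2
      · exact hinj m (2 * m) (by omega) (by omega) heq
      · exact gc_tail_ne n mu lam hlam hrep hinj m (2 * m) hlt h2 heq
    · intro h; omega
  · rw [gc_eq_mod n mu lam hlam hrep hinj m (2 * m) hge (by omega)]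
    constructor
    · intro hmod
      refine ⟨hge, ?_⟩
      have h2 : 2 * m - mu = (m - mu) + m := by omega
      rw [h2] at hmod
      have := (Nat.modEq_iff_dvd' (n := lam) (a := m - mu) (b := (m - mu) + m) (by omega)).1
        (by unfold Nat.ModEq; omega)
      simpa using this
    · rintro ⟨-, k, hk⟩
      have h2 : 2 * m - mu = (m - mu) + lam * k := by omega
      rw [h2, Nat.mul_comm lam k, Nat.add_mul_mod_self_right]

lemma gc_meet_exists (n : Int) (mu lam : Nat) (hlam : 1 ≤ lam)
    (hrep : gcG n (mu + lam) = gcG n mu)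
    (hinj : ∀ i j, i < j → j < mu + lam → gcG n i ≠ gcG n j) :
    ∃ m, (1 ≤ m ∧ gcG n m = gcG n (2 * m)) ∧ m ≤ mu + lam := by
  have hq := Nat.mod_add_div' mu lam
  have hmod : mu % lam < lam := Nat.mod_lt _ (by omega)
  have hval : lam * (mu / lam + 1) = mu / lam * lam + lam := by ring
  refine ⟨lam * (mu / lam + 1), ⟨by omega, ?_⟩, by omega⟩
  rw [gc_meet_iff n mu lam hlam hrep hinj _ (by omega)]
  exact ⟨by omega, Dvd.intro _ rfl⟩

lemma gc_floyd1_run (n : Int) (M : Nat)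
    (hM : gcG n M = gcG n (2 * M))
    (hmin : ∀ m, 1 ≤ m → m < M → gcG n m ≠ gcG n (2 * m)) :
    ∀ fuel i, 1 ≤ i → i ≤ M → M ≤ i + fuel →
      gcFloyd1 n fuel (gcG n i) (gcG n (2 * i)) = gcG n M := by
  intro fuel
  induction fuel with
  | zero =>
      intro i h1 h2 h3
      have he : i = M := by omega
      subst he
      show gcG n (2 * i) = gcG n i
      exact hM.symm
  | succ fuel ih =>
      intro i h1 h2 h3
      show (if gcG n i = gcG n (2 * i) then gcG n (2 * i) else _) = gcG n M
      rcases Nat.lt_or_ge i M with hlt | hge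
      · rw [if_neg (hmin i h1 hlt)]
        have e2 : gcStep n (gcStep n (gcG n (2 * i))) = gcG n (2 * (i + 1)) := by
          show gcStep n (gcStep n (gcG n (2 * i))) = gcG n (2 * i + 1 + 1)
          rfl
        show gcFloyd1 n fuel (gcG n (i + 1)) _ = _
        rw [e2]
        exact ih (i + 1) (by omega) (by omega) (by omega)
      · have he : i = M := by omega
        subst he
        rw [if_pos hM, hM]

lemma gc_floyd2_run (n : Int) (mu lam : Nat) (hlam : 1 ≤ lam)
    (hrep : gcG n (mu + lam) = gcG n mu)
    (hinj : ∀ i j, i < j → j < mu + lam → gcG n i ≠ gcG n j)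
    (M : Nat) (hMmu : mu ≤ M) (hMdvd : lam ∣ M) :
    ∀ fuel i, i ≤ mu → mu ≤ i + fuel →
      gcFloyd2 n fuel i (gcG n i) (gcG n (M + i)) = (mu, gcG n mu) := by
  have hmeet : gcG n mu = gcG n (M + mu) := by
    obtain ⟨k, hk⟩ := hMdvd
    have h1 : M + mu = mu + k * lam := by rw [Nat.mul_comm]; omega
    rw [h1, gc_per_mul n mu lam hrep k mu (le_refl _)]
  intro fuel
  induction fuel with
  | zero =>
      intro i h1 h2
      have he : i = mu := by omega
      subst he
      rfl
  | succ fuel ih =>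
      intro i h1 h2
      show (if gcG n i = gcG n (M + i) then (i, gcG n i) else _) = (mu, gcG n mu)
      rcases Nat.lt_or_ge i mu with hlt | hge
      · rw [if_neg (gc_tail_ne n mu lam hlam hrep hinj i (M + i) hlt (by omega))]
        show gcFloyd2 n fuel (i + 1) (gcG n (i + 1)) (gcStep n (gcG n (M + i))) = _
        have e2 : gcStep n (gcG n (M + i)) = gcG n (M + (i + 1)) := rfl
        rw [e2]
        exact ih (i + 1) (by omega) (by omega)
      · have he : i = mu := by omega
        subst he
        rw [if_pos hmeet]

lemma gc_floyd3_run (n : Int) (mu lam : Nat) (hlam : 1 ≤ lam)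
    (hrep : gcG n (mu + lam) = gcG n mu)
    (hinj : ∀ i j, i < j → j < mu + lam → gcG n i ≠ gcG n j) :
    ∀ fuel j, 1 ≤ j → j ≤ lam → lam ≤ j + fuel →
      gcFloyd3 n fuel j (gcG n mu) (gcG n (mu + j)) = lam := by
  intro fuel
  induction fuel with
  | zero =>
      intro j h1 h2 h3
      have he : j = lam := by omega
      subst he
      rfl
  | succ fuel ih =>
      intro j h1 h2 h3
      show (if gcG n mu = gcG n (mu + j) then j else _) = lam
      rcases Nat.lt_or_ge j lam with hlt | hge
      · have hne : gcG n mu ≠ gcG n (mu + j) := by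
          intro heq
          have hmm := (gc_eq_mod n mu lam hlam hrep hinj mu (mu + j) (le_refl _) (by omega)).1 heq
          rw [Nat.sub_self, Nat.zero_mod, Nat.add_sub_cancel_left, Nat.mod_eq_of_lt hlt] at hmm
          omega
        rw [if_neg hne]
        show gcFloyd3 n fuel (j + 1) (gcG n mu) (gcStep n (gcG n (mu + j))) = lam
        have e2 : gcStep n (gcG n (mu + j)) = gcG n (mu + (j + 1)) := rfl
        rw [e2]
        exact ih (j + 1) (by omega) (by omega) (by omega)
      · have he : j = lam := by omega
        rw [he, if_pos (gc_per n mu lam hrep mu (le_refl _)).symm]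

lemma gc_gen_run (n : Int) :
    ∀ (k : Nat) (acc : List Int) (i : Nat),
      gcGen n k acc (gcG n i) =
        (acc ++ (List.range k).map (fun t => gcDig n (gcG n (i + t))), gcG n (i + k)) := by
  intro k
  induction k with
  | zero => intro acc i; simp [gcGen]
  | succ k ih =>
      intro acc i
      show gcGen n k (acc ++ [PySem.Int.floordiv (gcG n i) n]) (gcStep n (gcG n i)) = _
      have e1 : gcStep n (gcG n i) = gcG n (i + 1) := rfl
      rw [e1, ih]
      simp only [Prod.mk.injEq]
      constructor
      · rw [List.range_succ_eq_map]
        simp only [List.map_cons, List.map_map, List.append_assoc]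
        congr 1
        rw [List.singleton_append]
        congr 1
        apply List.map_congr_left
        intro a _
        simp only [Function.comp_apply]
        have hia : i + 1 + a = i + (a + 1) := by omega
        rw [hia]
      · congr 1
        omega

lemma gc_aloop_run (n : Int) (mu lam : Nat) (hlam : 1 ≤ lam)
    (hrep : gcG n (mu + lam) = gcG n mu)
    (hinj : ∀ i j, i < j → j < mu + lam → gcG n i ≠ gcG n j) :
    ∀ (fuel k : Nat) (mem : PySem.Dict Int Int),
      k ≤ mu + lam → mu + lam + 1 ≤ fuel + k →
      (∀ j, j < k → mem.get? (gcG n j) = some (j : Int)) →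
      (∀ c, (∀ j, j < k → gcG n j ≠ c) → mem.get? c = none) →
      gcALoop n fuel mem (gcG n k) ((List.range k).map (fun t => gcDig n (gcG n t))) (k : Int) =
        (((List.range (mu + lam)).map (fun t => gcDig n (gcG n t))).take mu,
         ((List.range (mu + lam)).map (fun t => gcDig n (gcG n t))).drop mu) := by
  intro fuel
  induction fuel with
  | zero => intro k mem hk hfuel _ _; omega
  | succ fuel ih =>
      intro k mem hk hfuel hmem1 hmem2
      rcases Nat.lt_or_ge k (mu + lam) with hlt | hge
      · have hnone : mem.get? (gcG n k) = none :=
          hmem2 _ (fun j hj => hinj j k hj hlt)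
        show (match mem.get? (gcG n k) with
          | some j => (PySem.List.slice _ none (some j), PySem.List.slice _ (some j) none)
          | none => gcALoop n fuel (mem.insert (gcG n k) (k : Int)) (PySem.Int.mod (gcG n k) n * 10)
              (((List.range k).map (fun t => gcDig n (gcG n t))) ++ [PySem.Int.floordiv (gcG n k) n]) ((k : Int) + 1)) = _
        rw [hnone]
        have ecur : PySem.Int.mod (gcG n k) n * 10 = gcG n (k + 1) := rfl
        have echain : ((List.range k).map (fun t => gcDig n (gcG n t))) ++ [PySem.Int.floordiv (gcG n k) n]
            = (List.range (k + 1)).map (fun t => gcDig n (gcG n t)) := by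
          rw [List.range_succ, List.map_append]
          rfl
        have ei : (k : Int) + 1 = ((k + 1 : Nat) : Int) := by push_cast; ring
        rw [ecur, echain, ei]
        apply ih (k + 1) _ (by omega) (by omega)
        · intro j hj
          rw [PySem.Dict.get?_insert]
          rcases Nat.lt_or_ge j k with hjk | hjk
          · rw [if_neg (hinj j k hjk hlt), hmem1 j hjk]
          · have : j = k := by omega
            subst this
            rw [if_pos rfl]
        · intro c hc
          rw [PySem.Dict.get?_insert]
          rw [if_neg (fun h => hc k (by omega) h.symm), hmem2 c (fun j hj => hc j (by omega))]
      · have he : k = mu + lam := by omega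
        subst he
        have hsome : mem.get? (gcG n (mu + lam)) = some (mu : Int) := by
          rw [hrep]; exact hmem1 mu (by omega)
        show (match mem.get? (gcG n (mu + lam)) with
          | some j => (PySem.List.slice ((List.range (mu + lam)).map (fun t => gcDig n (gcG n t))) none (some j),
                       PySem.List.slice ((List.range (mu + lam)).map (fun t => gcDig n (gcG n t))) (some j) none)
          | none => gcALoop n fuel _ _ _ _) = _
        rw [hsome]
        show (PySem.List.slice ((List.range (mu + lam)).map (fun t => gcDig n (gcG n t))) none (some (mu : Int)),
              PySem.List.slice ((List.range (mu + lam)).map (fun t => gcDig n (gcG n t))) (some (mu : Int)) none) = _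
        rw [PySem.List.slice_to_natCast, PySem.List.slice_from_natCast]

theorem gc_main (n : Int) (hn : n ≠ 0) : get_chain n = get_chain_alt n := by
  classical
  obtain ⟨mu, lam, hlam, hbound, hrep, hinj⟩ := gc_bundle n hn
  obtain ⟨m0, hm0, hm0le⟩ := gc_meet_exists n mu lam hlam hrep hinj
  have hexm : ∃ m, 1 ≤ m ∧ gcG n m = gcG n (2 * m) := ⟨m0, hm0⟩
  obtain ⟨hM1, hMeq⟩ := Nat.find_spec hexm
  have hMle : Nat.find hexm ≤ mu + lam := le_trans (Nat.find_min' hexm hm0) hm0le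
  have hMmin : ∀ m, 1 ≤ m → m < Nat.find hexm → gcG n m ≠ gcG n (2 * m) :=
    fun m h1 hm heq => Nat.find_min hexm hm ⟨h1, heq⟩
  obtain ⟨hMmu, hMdvd⟩ := (gc_meet_iff n mu lam hlam hrep hinj _ hM1).1 hMeq
  -- A side
  have hA : get_chain n =
      (((List.range (mu + lam)).map (fun t => gcDig n (gcG n t))).take mu,
       ((List.range (mu + lam)).map (fun t => gcDig n (gcG n t))).drop mu) := by
    have h0 := gc_aloop_run n mu lam hlam hrep hinj (2 * n.natAbs + 3) 0 PySem.Dict.empty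
      (by omega) (by omega)
      (by intro j hj; omega)
      (by intro c _; exact PySem.Dict.get?_empty c)
    simpa [get_chain] using h0
  -- B side
  have hfl1 : gcFloyd1 n (2 * n.natAbs + 3) (gcStep n 10) (gcStep n (gcStep n 10))
      = gcG n (Nat.find hexm) := by
    have h := gc_floyd1_run n _ hMeq hMmin (2 * n.natAbs + 3) 1 (le_refl 1) hM1 (by omega)
    have e1 : gcG n 1 = gcStep n 10 := rfl
    have e2 : gcG n (2 * 1) = gcStep n (gcStep n 10) := rfl
    rw [e1, e2] at h
    exact h
  have hp : gcFloyd2 n (2 * n.natAbs + 3) 0 10 (gcG n (Nat.find hexm)) = (mu, gcG n mu) := by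
    have h := gc_floyd2_run n mu lam hlam hrep hinj _ hMmu hMdvd (2 * n.natAbs + 3) 0
      (by omega) (by omega)
    simpa using h
  have hl : gcFloyd3 n (2 * n.natAbs + 3) 1 (gcG n mu) (gcStep n (gcG n mu)) = lam := by
    have h := gc_floyd3_run n mu lam hlam hrep hinj (2 * n.natAbs + 3) 1 (le_refl 1) hlam (by omega)
    have e : gcG n (mu + 1) = gcStep n (gcG n mu) := rfl
    rw [e] at h
    exact h
  have hq : gcGen n mu [] 10 = ((List.range mu).map (fun t => gcDig n (gcG n t)), gcG n mu) := by
    have h := gc_gen_run n mu [] 0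
    simpa using h
  have hr : gcGen n lam [] (gcG n mu)
      = ((List.range lam).map (fun t => gcDig n (gcG n (mu + t))), gcG n (mu + lam)) :=
    gc_gen_run n lam [] mu
  have hB : get_chain_alt n =
      ((List.range mu).map (fun t => gcDig n (gcG n t)),
       (List.range lam).map (fun t => gcDig n (gcG n (mu + t)))) := by
    simp only [get_chain_alt]
    rw [hfl1, hp]
    simp only []
    rw [hl, hq]
    simp only []
    rw [hr]
  rw [hA, hB]
  have hf : ∀ (f : Nat → Int),
      (((List.range (mu + lam)).map f).take mu = (List.range mu).map f) ∧
      (((List.range (mu + lam)).map f).drop mu = (List.range lam).map (fun t => f (mu + t))) := by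
    intro f
    constructor
    · rw [← List.map_take, List.take_range, Nat.min_eq_left (Nat.le_add_right mu lam)]
    · rw [List.range_add, List.map_append, List.drop_append_of_le_length (by simp),
          List.drop_eq_nil_of_le (by simp), List.nil_append, List.map_map]
      rfl
  rw [(hf _).1, (hf _).2]

-- ===== VERDICT (by name: the statement is the Claim_ definition above) =====
theorem get_chain_spec : Claim_equal_get_chain := by
  intro n _hdom hpre
  show get_chain n = get_chain_alt n
  exact gc_main n hpre
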